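-- pv_equiv track=rewrite | github.com/IFM-UPIICSA/Metodos-Numericos | Proyecto/method_estadistico.py | SolTabla
-- ===== SOURCE A (Python) =====
-- def SolTabla(tabla, grade, num_datos):
--     tabla_completa = [] #Calc columnas => ( 2 + ( (grade*2) -3 ) + (grade - 1) )
--     for i in range(0 , num_datos):
--         temp_tabla = []
--         temp_tabla.append(tabla[0][i])
--         temp_tabla.append(tabla[1][i])
--         for j in range(2, ( (grade*2) -3 )):
--             temp_dato = ((tabla[0][i])**j)
--             temp_tabla.append(temp_dato)
--         for j in range(1, (grade - 1)):
--             temp_dato = ((tabla[0][i]**j)*tabla[1][i])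
--             temp_tabla.append(temp_dato)
--         tabla_completa.append(temp_tabla)
--     return tabla_completa
-- ===== SOURCE B (Python) =====
-- def SolTabla(tabla, grade, num_datos):
--     if num_datos <= 0:
--         return []
--     xs = [tabla[0][i] for i in range(num_datos)]
--     ys = [tabla[1][i] for i in range(num_datos)]
--     columnas = [xs, ys]
--     for j in range(2, grade * 2 - 3):
--         columnas.append([x ** j for x in xs])
--     for j in range(1, grade - 1):
--         columnas.append([x ** j * y for x, y in zip(xs, ys)])
--     return [[col[i] for col in columnas] for i in range(num_datos)]
-- ===== Notes on version B (the rewrite author's own statement) =====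
-- stated objective: alternative
-- what changed: B builds the design table column-by-column (x-column, y-column, then the power and cross-product columns in a single pass each) and transposes at the end, instead of A's row-by-row construction with the two inner power loops repeated per data point.
import Mathlib
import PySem

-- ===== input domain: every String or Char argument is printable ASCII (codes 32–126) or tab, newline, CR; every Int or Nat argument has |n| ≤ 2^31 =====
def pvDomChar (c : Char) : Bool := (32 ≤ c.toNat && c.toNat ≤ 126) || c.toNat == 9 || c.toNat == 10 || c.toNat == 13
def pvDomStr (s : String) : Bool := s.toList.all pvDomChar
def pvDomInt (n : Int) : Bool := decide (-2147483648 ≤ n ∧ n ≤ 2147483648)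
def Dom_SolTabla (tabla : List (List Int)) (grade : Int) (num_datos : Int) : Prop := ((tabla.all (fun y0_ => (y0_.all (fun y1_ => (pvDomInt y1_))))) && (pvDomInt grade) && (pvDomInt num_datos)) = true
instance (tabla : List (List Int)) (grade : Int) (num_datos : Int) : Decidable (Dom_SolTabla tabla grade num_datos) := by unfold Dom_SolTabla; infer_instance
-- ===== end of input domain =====

-- B builds the table column-by-column and transposes at the end instead of A's row-by-row loops; same cost, different decomposition.

-- ===== PORT A =====
def SolTabla (tabla : List (List Int)) (grade : Int) (num_datos : Int) : List (List Int) :=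
  (PySem.List.pyRange 0 num_datos 1).foldl (fun tabla_completa i =>
    let x : Int := PySem.List.pyGetD (PySem.List.pyGetD tabla 0 []) i 0
    let y : Int := PySem.List.pyGetD (PySem.List.pyGetD tabla 1 []) i 0
    let temp_tabla : List Int := [x, y]
    let temp_tabla := (PySem.List.pyRange 2 (grade * 2 - 3) 1).foldl
      (fun r j => r ++ [x ^ j.toNat]) temp_tabla
    let temp_tabla := (PySem.List.pyRange 1 (grade - 1) 1).foldl
      (fun r j => r ++ [x ^ j.toNat * y]) temp_tabla
    tabla_completa ++ [temp_tabla]) []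

-- ===== PORT B =====
def SolTabla_alt (tabla : List (List Int)) (grade : Int) (num_datos : Int) : List (List Int) :=
  if num_datos ≤ 0 then [] else
  let xs : List Int := (PySem.List.pyRange 0 num_datos 1).map
    (fun i => PySem.List.pyGetD (PySem.List.pyGetD tabla 0 []) i 0)
  let ys : List Int := (PySem.List.pyRange 0 num_datos 1).map
    (fun i => PySem.List.pyGetD (PySem.List.pyGetD tabla 1 []) i 0)
  let columnas : List (List Int) := [xs, ys]
  let columnas := (PySem.List.pyRange 2 (grade * 2 - 3) 1).foldl
    (fun acc j => acc ++ [xs.map (fun x => x ^ j.toNat)]) columnas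
  let columnas := (PySem.List.pyRange 1 (grade - 1) 1).foldl
    (fun acc j => acc ++ [(xs.zip ys).map (fun p => p.1 ^ j.toNat * p.2)]) columnas
  (PySem.List.pyRange 0 num_datos 1).map
    (fun i => columnas.map (fun col => PySem.List.pyGetD col i 0))

-- ===== PRECONDITION & SPEC =====
-- Pre_ excludes exactly the inputs where Python A raises IndexError: when num_datos > 0,
-- tabla must have at least two rows each holding at least num_datos entries.
def Pre_SolTabla (tabla : List (List Int)) (grade : Int) (num_datos : Int) : Prop :=
  0 < num_datos → (2 ≤ tabla.length ∧ num_datos ≤ ((tabla.getD 0 []).length : Int) ∧ num_datos ≤ ((tabla.getD 1 []).length : Int))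
instance (tabla : List (List Int)) (grade : Int) (num_datos : Int) : Decidable (Pre_SolTabla tabla grade num_datos) := by unfold Pre_SolTabla; infer_instance
def pvWitness_SolTabla : List (List Int) × Int × Int := ([[1, 2, 3], [4, 5, 6]], 4, 3)
def Spec_SolTabla (tabla : List (List Int)) (grade : Int) (num_datos : Int) (out : List (List Int)) : Prop := out = SolTabla_alt tabla grade num_datos
instance (tabla : List (List Int)) (grade : Int) (num_datos : Int) (out : List (List Int)) : Decidable (Spec_SolTabla tabla grade num_datos out) := by unfold Spec_SolTabla; infer_instance

-- ===== CLAIM (what is proved, stated in full; the proofs are below) =====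
def Claim_equal_SolTabla : Prop := ∀ (tabla : List (List Int)) (grade : Int) (num_datos : Int), Dom_SolTabla tabla grade num_datos → Pre_SolTabla tabla grade num_datos → Spec_SolTabla tabla grade num_datos (SolTabla tabla grade num_datos)

-- ===== LEMMAS AND PROOFS =====
theorem SolTabla_eq_alt (tabla : List (List Int)) (grade : Int) (num_datos : Int) :
    SolTabla tabla grade num_datos = SolTabla_alt tabla grade num_datos := by
  by_cases hn : num_datos ≤ 0
  · simp [SolTabla, SolTabla_alt, hn, PySem.List.pyRange_one_eq_nil]
  simp only [SolTabla, SolTabla_alt, if_neg hn, PySem.List.foldl_append_singleton_eq_map,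
    List.nil_append]
  apply List.map_congr_left
  intro i hi
  rw [PySem.List.mem_pyRange_one] at hi
  simp only [List.map_cons, List.map_nil, List.map_append, List.map_map, Function.comp_def,
    List.zip_map', PySem.List.pyGetD_map_pyRange_of_nonneg _ _ _ _ hi.1 hi.2]

-- ===== VERDICT (by name: the statement is the Claim_ definition above) =====
theorem SolTabla_spec : Claim_equal_SolTabla := by
  intro tabla grade num_datos _ _
  exact SolTabla_eq_alt tabla grade num_datos
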